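-- pv_equiv track=rewrite | github.com/ywfan617/python- | pintia/第3章-22 输出大写英文字母.py | output_uppperchar
-- ===== SOURCE A (Python) =====
-- def output_uppperchar(strs):
--     res=""
--     for i in strs:
--         if "A"<=i<="Z" and i not in res:
--             res+=i
--     if res=="":
--         res="Not Found"
--     return res
-- ===== SOURCE B (Python) =====
-- def output_uppperchar(strs):
--     # Scan the fixed 26-letter alphabet, keep letters present in strs,
--     # then order them by first occurrence; dedup is implicit (alphabet has no duplicates).
--     letters = [c for c in map(chr, range(65, 91)) if c in strs]
--     letters.sort(key=strs.index)
--     return "".join(letters) or "Not Found"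
-- ===== Notes on version B (the rewrite author's own statement) =====
-- stated objective: alternative
-- what changed: Instead of scanning strs and growing a dedup accumulator with a per-character membership rescan of the result, B iterates over the fixed 26-letter alphabet, keeps the letters that occur in strs, and sorts them by their first index in strs; no membership test against the growing result is ever made.
import Mathlib
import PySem

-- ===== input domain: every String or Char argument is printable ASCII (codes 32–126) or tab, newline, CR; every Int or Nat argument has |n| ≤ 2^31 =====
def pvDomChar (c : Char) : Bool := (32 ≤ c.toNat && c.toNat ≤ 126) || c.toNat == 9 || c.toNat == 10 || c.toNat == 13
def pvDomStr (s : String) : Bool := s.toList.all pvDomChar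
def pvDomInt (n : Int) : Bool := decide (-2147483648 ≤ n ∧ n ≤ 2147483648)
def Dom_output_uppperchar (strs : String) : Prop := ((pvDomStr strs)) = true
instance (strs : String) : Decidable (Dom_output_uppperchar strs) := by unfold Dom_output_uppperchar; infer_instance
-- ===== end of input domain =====

-- B replaces A's scan-and-grow dedup loop by a scan of the fixed 26-letter alphabet,
-- keeping the letters present in strs and sorting them by first occurrence (alternative algorithm, same values).


-- ===== PORT A =====
-- res accumulated as a List Char (Python string concatenation); the membership test is c ∉ res
def output_uppperchar (strs : String) : String :=
  let res := strs.toList.foldl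
    (fun res c => if ('A' ≤ c ∧ c ≤ 'Z') ∧ c ∉ res then res ++ [c] else res) ([] : List Char)
  if String.ofList res = "" then "Not Found" else String.ofList res

-- ===== PORT B =====
-- chr(n) for 65 ≤ n < 91 is Char.ofNat n.toNat (exact on that range); 'c in strs' on a
-- single character is list membership; strs.index(c) for a character present in strs is
-- the first index of c, i.e. List.idxOf (it never raises here since every letter kept by
-- the filter occurs in strs); ''.join(letters) or "Not Found" tests the joined string.
def output_uppperchar_alt (strs : String) : String :=
  let L := strs.toList
  let letters := ((PySem.List.pyRange 65 91 1).map (fun n => Char.ofNat n.toNat)).filter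
    (fun c => L.contains c)
  let out := String.ofList (PySem.List.sorted letters (fun c => L.idxOf c) false)
  if out = "" then "Not Found" else out

-- ===== PRECONDITION & SPEC =====
def Spec_output_uppperchar (strs : String) (out : String) : Prop := out = output_uppperchar_alt strs
instance (strs : String) (out : String) : Decidable (Spec_output_uppperchar strs out) := by unfold Spec_output_uppperchar; infer_instance

-- ===== CLAIM (what is proved, stated in full; the proofs are below) =====
def Claim_equal_output_uppperchar : Prop := ∀ (strs : String), Dom_output_uppperchar strs → Spec_output_uppperchar strs (output_uppperchar strs)

-- ===== LEMMAS AND PROOFS =====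

-- A's loop over a list = Set.update of the accumulator with the filtered characters
theorem pv_loop_eq (l acc : List Char) :
    l.foldl (fun res c => if ('A' ≤ c ∧ c ≤ 'Z') ∧ c ∉ res then res ++ [c] else res) acc
      = PySem.Set.update acc (l.filter (fun c => decide ('A' ≤ c ∧ c ≤ 'Z'))) := by
  induction l generalizing acc with
  | nil => simp [PySem.Set.update]
  | cons c l ih =>
    by_cases hp : 'A' ≤ c ∧ c ≤ 'Z'
    · simp only [List.foldl_cons, List.filter_cons, hp, decide_true, and_self, if_true,
        PySem.Set.update_cons, ih]
      congr 1
      by_cases hm : c ∈ acc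
      · simp [hm, PySem.Set.add_of_mem]
      · simp [hm, PySem.Set.add_of_not_mem]
    · simp only [List.foldl_cons, List.filter_cons, hp, decide_false, ih]
      simp

-- character comparison is comparison of code points
theorem pv_char_le_iff (a b : Char) : a ≤ b ↔ a.toNat ≤ b.toNat := by
  rw [Char.le_def]; exact UInt32.le_iff_toNat_le

-- membership in B's mapped alphabet is exactly A's uppercase test
theorem pv_mem_alpha (a : Char) :
    a ∈ ((PySem.List.pyRange 65 91 1).map (fun n => Char.ofNat n.toNat)) ↔ ('A' ≤ a ∧ a ≤ 'Z') := by
  constructor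
  · intro h
    obtain ⟨n, hn, rfl⟩ := List.mem_map.mp h
    rw [PySem.List.mem_pyRange_one] at hn
    have hv : (n.toNat).isValidChar := Or.inl (by omega)
    have ht : (Char.ofNat n.toNat).toNat = n.toNat := by
      rw [Char.toNat_ofNat]; simp [hv]
    have hA : 'A'.toNat = 65 := rfl
    have hZ : 'Z'.toNat = 90 := rfl
    constructor <;> rw [pv_char_le_iff, ht] <;> omega
  · rintro ⟨h1, h2⟩
    rw [pv_char_le_iff] at h1 h2
    refine List.mem_map.mpr ⟨(a.toNat : Int), ?_, ?_⟩
    · rw [PySem.List.mem_pyRange_one]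
      have hA : 'A'.toNat = 65 := rfl
      have hZ : 'Z'.toNat = 90 := rfl
      omega
    · simp [Char.ofNat_toNat]

-- the first-seen dedup of the uppercase letters of L is strictly increasing in first index
theorem pv_pairwise_idxOf (L : List Char) :
    (PySem.Set.ofList (L.filter (fun c => decide ('A' ≤ c ∧ c ≤ 'Z')))).Pairwise
      (fun a b => L.idxOf a < L.idxOf b) := by
  induction L using List.reverseRecOn with
  | nil => simp [PySem.Set.ofList]
  | append_singleton xs x ih =>
    rw [List.filter_append]
    by_cases hp : 'A' ≤ x ∧ x ≤ 'Z'
    · have hfx : List.filter (fun c => decide ('A' ≤ c ∧ c ≤ 'Z')) [x] = [x] := by simp [hp]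
      rw [hfx, PySem.Set.ofList_append_singleton]
      by_cases hx : x ∈ PySem.Set.ofList (xs.filter (fun c => decide ('A' ≤ c ∧ c ≤ 'Z')))
      · rw [PySem.Set.add_of_mem hx]
        refine ih.imp_of_mem ?_
        intro a b ha hb hab
        have ha' : a ∈ xs := (List.mem_filter.mp ((PySem.Set.mem_ofList _ _).mp ha)).1
        have hb' : b ∈ xs := (List.mem_filter.mp ((PySem.Set.mem_ofList _ _).mp hb)).1
        rwa [List.idxOf_append_of_mem ha', List.idxOf_append_of_mem hb']
      · rw [PySem.Set.add_of_not_mem hx]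
        have hxxs : x ∉ xs := fun h => hx ((PySem.Set.mem_ofList _ _).mpr (List.mem_filter.mpr ⟨h, by simp [hp]⟩))
        rw [List.pairwise_append]
        refine ⟨ih.imp_of_mem ?_, List.pairwise_singleton _ _, ?_⟩
        · intro a b ha hb hab
          have ha' : a ∈ xs := (List.mem_filter.mp ((PySem.Set.mem_ofList _ _).mp ha)).1
          have hb' : b ∈ xs := (List.mem_filter.mp ((PySem.Set.mem_ofList _ _).mp hb)).1
          rwa [List.idxOf_append_of_mem ha', List.idxOf_append_of_mem hb']
        · intro a ha b hb
          have ha' : a ∈ xs := (List.mem_filter.mp ((PySem.Set.mem_ofList _ _).mp ha)).1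
          rw [List.mem_singleton] at hb; subst hb
          rw [List.idxOf_append_of_mem ha']
          have h1 : xs.idxOf a < xs.length := List.idxOf_lt_length_of_mem ha'
          have h2 : (xs ++ [b]).idxOf b = xs.length := by
            have := PySem.List.index?_append_singleton_self (l := xs) (c := b) hxxs
            rw [PySem.List.index?_eq_idxOf?] at this
            rw [List.idxOf_eq_getD_idxOf?, this]
            rfl
          omega
    · have hfx : List.filter (fun c => decide ('A' ≤ c ∧ c ≤ 'Z')) [x] = [] := by simp [hp]
      rw [hfx, List.append_nil]
      refine ih.imp_of_mem ?_
      intro a b ha hb hab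
      have ha' : a ∈ xs := (List.mem_filter.mp ((PySem.Set.mem_ofList _ _).mp ha)).1
      have hb' : b ∈ xs := (List.mem_filter.mp ((PySem.Set.mem_ofList _ _).mp hb)).1
      rwa [List.idxOf_append_of_mem ha', List.idxOf_append_of_mem hb']

-- B's sort of the present alphabet letters IS A's first-seen dedup
theorem pv_main (L : List Char) :
    PySem.List.sorted (((PySem.List.pyRange 65 91 1).map (fun n => Char.ofNat n.toNat)).filter
        (fun c => L.contains c)) (fun c => L.idxOf c) false
      = PySem.Set.ofList (L.filter (fun c => decide ('A' ≤ c ∧ c ≤ 'Z'))) := by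
  apply PySem.List.sorted_eq_of_perm_of_pairwise_lt
  · apply (List.perm_ext_iff_of_nodup (PySem.Set.nodup_ofList _) ?_).mpr
    · intro a
      rw [PySem.Set.mem_ofList, List.mem_filter, List.mem_filter, pv_mem_alpha]
      simp [and_comm]
    · exact List.Nodup.filter _ (by decide)
  · exact pv_pairwise_idxOf L

-- ===== VERDICT (by name: the statement is the Claim_ definition above) =====
theorem output_uppperchar_spec : Claim_equal_output_uppperchar := by
  intro strs _
  unfold Spec_output_uppperchar output_uppperchar output_uppperchar_alt
  simp only [pv_loop_eq, PySem.Set.update_nil_left, pv_main]
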